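-- pv_equiv track=rewrite | github.com/Htorf/WhatThisApp | whatsapp.py | nbMessageParAuteur
-- ===== SOURCE A (Python) =====
-- def listeDesParticipants(listeDesAuteurs):
--     liste=[]
--     for k in listeDesAuteurs:
--         if k not in liste:
--             liste.append(k)
--     return (liste)
--
-- def nbMessageParAuteur(listeDesAuteurs):
--     listeParticipant=listeDesParticipants(listeDesAuteurs)
--     compteur=[0]*len(listeParticipant)
--     for k in listeDesAuteurs:
--         for l in range(len(listeParticipant)):
--             if k==listeParticipant[l]:
--                 compteur[l]+=1
--     return (compteur)
-- ===== SOURCE B (Python) =====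
-- def nbMessageParAuteur(listeDesAuteurs):
--     compteur = {}
--     for k in listeDesAuteurs:
--         compteur[k] = compteur.get(k, 0) + 1
--     return list(compteur.values())
-- ===== Notes on version B (the rewrite author's own statement) =====
-- stated objective: faster
-- what changed: Replaces the dedup helper plus nested per-message scan over the participant list with a single pass building a dict counter (insertion order = first appearance) and returning its values.
import Mathlib
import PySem

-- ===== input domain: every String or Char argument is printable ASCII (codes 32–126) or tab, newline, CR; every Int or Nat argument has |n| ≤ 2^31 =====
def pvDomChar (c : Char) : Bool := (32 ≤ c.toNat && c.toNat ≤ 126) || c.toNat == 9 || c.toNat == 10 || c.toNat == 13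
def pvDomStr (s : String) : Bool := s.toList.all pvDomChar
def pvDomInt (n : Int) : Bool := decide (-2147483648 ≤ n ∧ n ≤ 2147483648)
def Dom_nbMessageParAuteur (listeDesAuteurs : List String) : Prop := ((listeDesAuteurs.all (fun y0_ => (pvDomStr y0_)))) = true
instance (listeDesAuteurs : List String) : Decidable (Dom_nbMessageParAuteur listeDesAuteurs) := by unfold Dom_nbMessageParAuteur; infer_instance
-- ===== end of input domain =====

-- B replaces the dedup helper + nested per-message scan by a one-pass dict counter (O(n) vs O(n*p)).

-- ===== PORT A =====
def listeDesParticipants (listeDesAuteurs : List String) : List String :=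
  listeDesAuteurs.foldl (fun liste k => if k ∈ liste then liste else liste ++ [k]) []

def nbMessageParAuteur (listeDesAuteurs : List String) : List Int :=
  let listeParticipant := listeDesParticipants listeDesAuteurs
  let compteur := List.replicate listeParticipant.length (0 : Int)
  listeDesAuteurs.foldl
    (fun compteur k =>
      (List.range listeParticipant.length).foldl
        (fun compteur l =>
          if k = listeParticipant.getD l "" then compteur.set l (compteur.getD l 0 + 1)
          else compteur)
        compteur)
    compteur

-- ===== PORT B =====
def nbMessageParAuteur_alt (listeDesAuteurs : List String) : List Int :=
  (listeDesAuteurs.foldl (fun compteur k => compteur.insert k (compteur.getD k 0 + 1))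
    PySem.Dict.empty).values

-- ===== PRECONDITION & SPEC =====
def Spec_nbMessageParAuteur (listeDesAuteurs : List String) (out : List Int) : Prop := out = nbMessageParAuteur_alt listeDesAuteurs
instance (listeDesAuteurs : List String) (out : List Int) : Decidable (Spec_nbMessageParAuteur listeDesAuteurs out) := by unfold Spec_nbMessageParAuteur; infer_instance

-- ===== CLAIM (what is proved, stated in full; the proofs are below) =====
def Claim_equal_nbMessageParAuteur : Prop := ∀ (listeDesAuteurs : List String), Dom_nbMessageParAuteur listeDesAuteurs → Spec_nbMessageParAuteur listeDesAuteurs (nbMessageParAuteur listeDesAuteurs)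

-- ===== LEMMAS AND PROOFS =====

-- A's participant list is set(xs) in first-insertion order.
theorem listeDesParticipants_eq_ofList (xs : List String) :
    listeDesParticipants xs = PySem.Set.ofList xs := by
  rw [PySem.Set.ofList_eq_foldl, listeDesParticipants]
  congr 1
  funext s k
  simp [PySem.Set.add, PySem.Set.contains]

-- A's inner scan preserves the counter's length.
theorem inner_length (lp : List String) (k : String) (L : List Nat) (c : List Int) :
    (L.foldl (fun c l => if k = lp.getD l "" then c.set l (c.getD l 0 + 1) else c) c).length
      = c.length := by
  induction L generalizing c with
  | nil => rfl
  | cons l t ih =>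
    simp only [List.foldl_cons]
    split
    · rw [ih, List.length_set]
    · exact ih c

-- Pointwise effect of one message k: each in-range index whose participant equals k gains 1.
theorem inner_getD (lp : List String) (k : String) (L : List Nat) (hL : L.Nodup)
    (c : List Int) (hlen : ∀ l ∈ L, l < c.length) (j : Nat) :
    (L.foldl (fun c l => if k = lp.getD l "" then c.set l (c.getD l 0 + 1) else c) c).getD j 0
      = c.getD j 0 + (if j ∈ L ∧ k = lp.getD j "" then 1 else 0) := by
  induction L generalizing c with
  | nil => simp
  | cons l t ih =>
    simp only [List.foldl_cons]
    have hlt : l < c.length := hlen l (by simp)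
    have ht : t.Nodup := hL.of_cons
    have hnl : l ∉ t := by simpa using (List.nodup_cons.mp hL).1
    by_cases hk : k = lp.getD l ""
    · rw [if_pos hk,
        ih ht _ (fun x hx => by
          rw [List.length_set]; exact hlen x (List.mem_cons_of_mem _ hx))]
      by_cases hj : j = l
      · subst hj
        have hset : (c.set j (c.getD j 0 + 1)).getD j 0 = c.getD j 0 + 1 := by
          simp [List.getD_eq_getElem?_getD, List.getElem?_set_self hlt]
        rw [hset]
        simp [hnl, hk]
      · have hset : (c.set l (c.getD l 0 + 1)).getD j 0 = c.getD j 0 := by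
          simp [List.getD_eq_getElem?_getD, List.getElem?_set_ne (by omega : l ≠ j)]
        rw [hset]
        simp [List.mem_cons, hj]
    · rw [if_neg hk,
        ih ht _ (fun x hx => hlen x (List.mem_cons_of_mem _ hx))]
      by_cases hj : j = l
      · subst hj
        rw [if_neg (fun h => hk h.2), if_neg (fun h => hk h.2)]
      · simp [List.mem_cons, hj]

-- Pointwise effect of the whole message loop: index j gains one per message equal to lp[j].
theorem outer_getD (lp : List String) (l : List String) (c : List Int)
    (hc : c.length = lp.length) (j : Nat) :
    (l.foldl
        (fun c k => (List.range lp.length).foldl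
          (fun c i => if k = lp.getD i "" then c.set i (c.getD i 0 + 1) else c) c)
        c).getD j 0
      = c.getD j 0 + (if j < lp.length then (l.count (lp.getD j "") : Int) else 0) := by
  induction l generalizing c with
  | nil => simp
  | cons k t ih =>
    simp only [List.foldl_cons]
    have hlen : ∀ i ∈ List.range lp.length, i < c.length := by simp [hc]
    have hl : ((List.range lp.length).foldl
        (fun c i => if k = lp.getD i "" then c.set i (c.getD i 0 + 1) else c) c).length
        = lp.length := by rw [inner_length]; exact hc
    rw [ih _ hl, inner_getD lp k _ (List.nodup_range) c hlen j]
    by_cases hj : j < lp.length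
    · simp only [List.mem_range, hj, true_and, if_true, List.count_cons]
      by_cases hk : k = lp.getD j ""
      · rw [if_pos hk, if_pos (beq_iff_eq.mpr hk)]
        push_cast; ring
      · rw [if_neg hk, if_neg (fun hb => hk (beq_iff_eq.mp hb))]
        push_cast; ring
    · simp [hj]

theorem outer_length (lp : List String) (l : List String) (c : List Int) :
    (l.foldl
        (fun c k => (List.range lp.length).foldl
          (fun c i => if k = lp.getD i "" then c.set i (c.getD i 0 + 1) else c) c)
        c).length = c.length := by
  induction l generalizing c with
  | nil => rfl
  | cons k t ih => simp only [List.foldl_cons]; rw [ih, inner_length]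

-- A returns, for each first-appearance participant, its count in the message list.
theorem nbMessageParAuteur_eq_map (xs : List String) :
    nbMessageParAuteur xs
      = (PySem.Set.ofList xs).map (fun p => (xs.count p : Int)) := by
  rw [nbMessageParAuteur]
  have hlp := listeDesParticipants_eq_ofList xs
  set lp := listeDesParticipants xs with hdef
  have hlen : (xs.foldl
      (fun c k => (List.range lp.length).foldl
        (fun c i => if k = lp.getD i "" then c.set i (c.getD i 0 + 1) else c) c)
      (List.replicate lp.length (0 : Int))).length = lp.length := by
    rw [outer_length]; simp
  rw [← hlp]
  apply List.ext_getElem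
  · simpa using hlen
  · intro j hj₁ hj₂
    have hj : j < lp.length := by simpa using hj₂
    have := outer_getD lp xs (List.replicate lp.length (0 : Int)) (by simp) j
    rw [List.getD_eq_getElem?_getD, List.getElem?_eq_getElem hj₁] at this
    simp only [Option.getD_some] at this
    rw [this]
    simp [hj, List.getD_eq_getElem?_getD]

-- B returns the counter's values: the same map over set(xs).
theorem nbMessageParAuteur_alt_eq_map (xs : List String) :
    nbMessageParAuteur_alt xs
      = (PySem.Set.ofList xs).map (fun p => (xs.count p : Int)) := by
  rw [nbMessageParAuteur_alt, PySem.Dict.foldl_insert_getD_add_one_eq_counter]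
  show (PySem.Dict.counter xs).items.map (·.2) = _
  rw [PySem.Dict.items_counter]
  simp [List.map_map, Function.comp]

-- ===== VERDICT (by name: the statement is the Claim_ definition above) =====
theorem nbMessageParAuteur_spec : Claim_equal_nbMessageParAuteur := by
  intro xs _
  show nbMessageParAuteur xs = nbMessageParAuteur_alt xs
  rw [nbMessageParAuteur_eq_map, nbMessageParAuteur_alt_eq_map]
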